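-- pv_equiv track=rewrite | github.com/jelmer/dulwich | dulwich/sparse_patterns.py | fnmatch_to_regex
-- ===== SOURCE A (Python) =====
-- def fnmatch_to_regex(pat):
--     """Translate a wildcard pattern (with * ? **) into a Python regex.
--     This is somewhat like 'fnmatch.translate', but we also handle '**' for multi-dir.
--     We'll keep slash as a special char that *never* matches with single '*'.
--     """
--     i = 0
--     res = []
--     while i < len(pat):
--         c = pat[i]
--         if c == "*":
--             # check if next char is also '*'
--             if (i + 1) < len(pat) and pat[i + 1] == "*":
--                 # this is a '**'
--                 # In Git, '**' means match zero or more directories.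
--                 # We'll translate that to '(.+)?' across path segments, but we have to allow
--                 # skipping over multiple subdirs, so let's do something like:
--                 # '((?:[^/]+/)*)?' => zero or more <non-slash>+<slash> groups
--                 res.append(
--                     "(?:.*)"
--                 )  # a simpler approach: match anything including slashes
--                 i += 2
--             else:
--                 # single '*'
--                 # match any number of non-slash chars
--                 res.append("[^/]*")
--                 i += 1
--         elif c == "?":
--             # match exactly one non-slash character
--             res.append("[^/]")
--             i += 1
--         else:
--             # escape regex special chars, except slash we keep as slash
--             if c in ".^$+{}[]()|\\":
--                 res.append("\\")
--             res.append(c)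
--             i += 1
--     # We'll match entire string if the 'line' is to match a full path component
--     # but in gitignore, partial component match is allowed. We'll handle boundary logic later.
--     return "^" + "".join(res) + "$"
-- ===== SOURCE B (Python) =====
-- def fnmatch_to_regex(pat):
--     """Translate a wildcard pattern (with * ? **) into a Python regex.
--
--     Run-length approach: group the pattern into maximal runs of equal
--     characters, then emit each group's regex in closed form ('**'-pairs
--     are consumed greedily, so a run of k stars becomes k//2 copies of
--     '(?:.*)' followed by k%2 copies of '[^/]*').
--     """
--     groups = []
--     for c in pat:
--         if groups and groups[-1][0] == c:
--             groups[-1][1] += 1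
--         else:
--             groups.append([c, 1])
--     out = []
--     for c, k in groups:
--         if c == "*":
--             out.append("(?:.*)" * (k // 2) + "[^/]*" * (k % 2))
--         elif c == "?":
--             out.append("[^/]" * k)
--         else:
--             e = "\\" + c if c in ".^$+{}[]()|\\" else c
--             out.append(e * k)
--     return "^" + "".join(out) + "$"
-- ===== Notes on version B (the rewrite author's own statement) =====
-- stated objective: alternative
-- what changed: B replaces A's index+lookahead scan with a two-phase pipeline: it first run-length groups the pattern into maximal runs of equal characters, then emits each run's regex in closed form (a run of k stars yields k//2 double-star chunks plus k%2 single-star chunks).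
import Mathlib
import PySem

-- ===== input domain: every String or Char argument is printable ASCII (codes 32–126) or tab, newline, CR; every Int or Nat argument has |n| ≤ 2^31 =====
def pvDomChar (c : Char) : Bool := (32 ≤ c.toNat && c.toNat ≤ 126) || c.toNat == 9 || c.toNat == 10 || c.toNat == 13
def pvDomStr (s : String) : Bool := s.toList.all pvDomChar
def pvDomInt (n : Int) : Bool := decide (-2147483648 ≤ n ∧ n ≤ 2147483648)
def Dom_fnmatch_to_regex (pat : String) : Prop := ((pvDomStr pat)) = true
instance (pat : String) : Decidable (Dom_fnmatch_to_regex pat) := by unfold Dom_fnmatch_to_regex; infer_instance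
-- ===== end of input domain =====

-- B re-implements A by run-length grouping the pattern and emitting each group's
-- regex in closed form ('alternative' decomposition, same output everywhere).

-- ===== PORT A =====
-- `c in ".^$+{}[]()|\\"` (shared character-class test, used verbatim by both Pythons)
def pvSpecial (c : Char) : Bool := PySem.Str.isIn (String.ofList [c]) ".^$+{}[]()|\\"

-- the `while i < len(pat)` loop of A, state = (i, res)
def fnmatchLoopA (l : List Char) (i : Nat) (res : List String) : List String :=
  if h : i < l.length then
    let c := l[i]
    if c = '*' then
      if i + 1 < l.length ∧ l[i + 1]? = some '*' then
        fnmatchLoopA l (i + 2) (res ++ ["(?:.*)"])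
      else
        fnmatchLoopA l (i + 1) (res ++ ["[^/]*"])
    else if c = '?' then
      fnmatchLoopA l (i + 1) (res ++ ["[^/]"])
    else
      fnmatchLoopA l (i + 1) ((if pvSpecial c then res ++ ["\\"] else res) ++ [String.ofList [c]])
  else res
termination_by l.length - i

def fnmatch_to_regex (pat : String) : String :=
  "^" ++ PySem.Str.join "" (fnmatchLoopA pat.toList 0 []) ++ "$"

-- ===== PORT B =====
-- one step of B's first loop: merge c into the last run or start a new one
def pvGroupStep (groups : List (Char × Nat)) (c : Char) : List (Char × Nat) :=
  match groups.getLast? with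
  | some (d, k) => if d = c then groups.dropLast ++ [(d, k + 1)] else groups ++ [(c, 1)]
  | none => [(c, 1)]

-- B's second loop body: the regex for one run of k equal characters
def pvGroupOut (g : Char × Nat) : String :=
  if g.1 = '*' then
    PySem.Str.join "" (List.replicate (g.2 / 2) "(?:.*)") ++
      PySem.Str.join "" (List.replicate (g.2 % 2) "[^/]*")
  else if g.1 = '?' then
    PySem.Str.join "" (List.replicate g.2 "[^/]")
  else
    let e := if pvSpecial g.1 then "\\" ++ String.ofList [g.1] else String.ofList [g.1]
    PySem.Str.join "" (List.replicate g.2 e)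

def fnmatch_to_regex_alt (pat : String) : String :=
  let groups := pat.toList.foldl pvGroupStep []
  "^" ++ PySem.Str.join "" (groups.map pvGroupOut) ++ "$"

-- ===== PRECONDITION & SPEC =====
def Spec_fnmatch_to_regex (pat : String) (out : String) : Prop := out = fnmatch_to_regex_alt pat
instance (pat : String) (out : String) : Decidable (Spec_fnmatch_to_regex pat out) := by unfold Spec_fnmatch_to_regex; infer_instance

-- ===== CLAIM (what is proved, stated in full; the proofs are below) =====
def Claim_equal_fnmatch_to_regex : Prop := ∀ (pat : String), Dom_fnmatch_to_regex pat → Spec_fnmatch_to_regex pat (fnmatch_to_regex pat)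

-- ===== LEMMAS AND PROOFS =====

-- reference translation, structural on the char list
def gA : List Char → List Char
  | [] => []
  | c :: t =>
    if c = '*' then
      match t with
      | d :: t' => if d = '*' then "(?:.*)".toList ++ gA t' else "[^/]*".toList ++ gA (d :: t')
      | [] => "[^/]*".toList
    else if c = '?' then "[^/]".toList ++ gA t
    else (if pvSpecial c then ['\\', c] else [c]) ++ gA t
termination_by l => l.length
decreasing_by all_goals simp

def joinL (rs : List String) : List Char := (rs.map String.toList).flatten

theorem join_empty_flatten (ps : List (List Char)) : PySem.Chars.join [] ps = ps.flatten := by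
  induction ps with
  | nil => simp [PySem.Chars.join_nil]
  | cons a t ih =>
    cases t with
    | nil => simp [PySem.Chars.join_singleton]
    | cons b u => rw [PySem.Chars.join_cons_cons, ih]; simp

theorem joinEmpty_toList (rs : List String) : (PySem.Str.join "" rs).toList = joinL rs := by
  rw [PySem.Str.toList_join]
  have hsep : ("" : String).toList = [] := by simp
  rw [hsep, join_empty_flatten, joinL]

theorem joinL_concat (rs : List String) (s : String) :
    joinL (rs ++ [s]) = joinL rs ++ s.toList := by
  simp [joinL]

theorem gA_nil : gA [] = [] := by simp [gA]

theorem gA_star_star (t : List Char) : gA ('*' :: '*' :: t) = "(?:.*)".toList ++ gA t := by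
  simp [gA]

theorem gA_star_not (t : List Char) (h : t.head? ≠ some '*') :
    gA ('*' :: t) = "[^/]*".toList ++ gA t := by
  cases t with
  | nil => simp [gA]
  | cons d t' =>
    have hd : d ≠ '*' := by simpa using h
    simp [gA, hd]

theorem gA_cons (c : Char) (t : List Char) (h : c ≠ '*') :
    gA (c :: t) =
      (if c = '?' then "[^/]".toList else if pvSpecial c then ['\\', c] else [c]) ++ gA t := by
  rw [gA.eq_def]
  by_cases h? : c = '?' <;> simp [h, h?]

-- A's loop equals gA on the rest of the list
theorem loopA_eq (l : List Char) (i : Nat) (res : List String) :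
    joinL (fnmatchLoopA l i res) = joinL res ++ gA (l.drop i) := by
  induction i, res using fnmatchLoopA.induct l with
  | case1 i res h c hstar hcond ih =>
    -- '**'
    have hstar' : l[i] = '*' := hstar
    have hcond' : i + 1 < l.length ∧ l[i + 1]? = some '*' := hcond
    rw [fnmatchLoopA, dif_pos h, if_pos hstar', if_pos hcond']
    rw [ih, joinL_concat]
    have h1 : i + 1 < l.length := hcond'.1
    have hstar2 : l[i + 1] = '*' := by
      have := hcond'.2
      rwa [List.getElem?_eq_getElem h1, Option.some_inj] at this
    rw [List.drop_eq_getElem_cons h, List.drop_eq_getElem_cons h1, hstar', hstar2,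
      gA_star_star]
    simp
  | case2 i res h c hstar hncond ih =>
    -- single '*'
    have hstar' : l[i] = '*' := hstar
    have hncond' : ¬(i + 1 < l.length ∧ l[i + 1]? = some '*') := hncond
    rw [fnmatchLoopA, dif_pos h, if_pos hstar', if_neg hncond']
    rw [ih, joinL_concat]
    have hhd : (l.drop (i + 1)).head? ≠ some '*' := by
      rw [List.head?_drop]
      intro hc
      have hlt : i + 1 < l.length := by
        by_contra hge
        rw [List.getElem?_eq_none (by omega)] at hc
        simp at hc
      exact hncond' ⟨hlt, hc⟩
    rw [List.drop_eq_getElem_cons h, hstar', gA_star_not _ hhd]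
    simp
  | case3 i res h c hns hq ih =>
    -- '?'
    have hns' : ¬ l[i] = '*' := hns
    have hq' : l[i] = '?' := hq
    rw [fnmatchLoopA, dif_pos h, if_neg hns', if_pos hq']
    rw [ih, joinL_concat]
    rw [List.drop_eq_getElem_cons h, hq', gA_cons _ _ (by decide)]
    simp
  | case4 i res h c hns hnq ih =>
    -- ordinary character
    have hns' : ¬ l[i] = '*' := hns
    have hnq' : ¬ l[i] = '?' := hnq
    rw [fnmatchLoopA, dif_pos h, if_neg hns', if_neg hnq']
    have ih' : joinL (fnmatchLoopA l (i + 1)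
        ((if pvSpecial l[i] = true then res ++ ["\\"] else res) ++ [String.ofList [l[i]]])) =
        joinL ((if pvSpecial l[i] = true then res ++ ["\\"] else res) ++ [String.ofList [l[i]]]) ++
          gA (List.drop (i + 1) l) := ih
    rw [ih']
    rw [List.drop_eq_getElem_cons h, gA_cons _ _ hns']
    by_cases hs : pvSpecial l[i] <;>
      simp [hs, hnq', joinL_concat, joinL, List.append_assoc]
  | case5 i res h =>
    rw [fnmatchLoopA, dif_neg h]
    rw [List.drop_eq_nil_of_le (by omega), gA_nil, List.append_nil]

-- B's grouping fold, in structural form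
def rleFrom (c : Char) (k : Nat) : List Char → List (Char × Nat)
  | [] => [(c, k)]
  | d :: t => if d = c then rleFrom c (k + 1) t else (c, k) :: rleFrom d 1 t

theorem foldl_step_eq (cs : List Char) :
    ∀ (acc : List (Char × Nat)) (c : Char) (k : Nat),
      List.foldl pvGroupStep (acc ++ [(c, k)]) cs = acc ++ rleFrom c k cs := by
  induction cs with
  | nil => intro acc c k; simp [rleFrom]
  | cons d t ih =>
    intro acc c k
    rw [List.foldl_cons]
    have hstep : pvGroupStep (acc ++ [(c, k)]) d =
        if d = c then acc ++ [(c, k + 1)] else (acc ++ [(c, k)]) ++ [(d, 1)] := by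
      rw [pvGroupStep, List.getLast?_concat]
      by_cases hdc : c = d
      · subst hdc; simp [List.dropLast_concat]
      · simp [hdc, Ne.symm hdc]
    rw [hstep]
    by_cases hdc : d = c
    · rw [if_pos hdc, ih, rleFrom, if_pos hdc]
    · rw [if_neg hdc, ih, rleFrom, if_neg hdc]
      simp

-- the regex for one homogeneous run, as gA computes it
theorem joinL_cons (s : String) (rs : List String) :
    joinL (s :: rs) = s.toList ++ joinL rs := by
  simp [joinL]

theorem out_star_toList (k : Nat) :
    (pvGroupOut ('*', k)).toList =
      (List.replicate (k / 2) "(?:.*)".toList).flatten ++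
        (List.replicate (k % 2) "[^/]*".toList).flatten := by
  simp [pvGroupOut, join_empty_flatten, joinL, List.map_replicate]

theorem out_char_toList (c : Char) (hc : c ≠ '*') (k : Nat) :
    (pvGroupOut (c, k)).toList =
      (List.replicate k
        (if c = '?' then "[^/]".toList else if pvSpecial c then ['\\', c] else [c])).flatten := by
  by_cases h? : c = '?' <;>
    by_cases hs : pvSpecial c <;>
      simp [pvGroupOut, hc, h?, hs, join_empty_flatten, joinL, List.map_replicate]

theorem gA_star_run (k : Nat) (rest : List Char) (h : rest.head? ≠ some '*') :
    gA (List.replicate k '*' ++ rest) = (pvGroupOut ('*', k)).toList ++ gA rest := by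
  induction k using Nat.twoStepInduction with
  | zero => simp [out_star_toList]
  | one =>
    rw [out_star_toList, List.replicate_one, List.singleton_append, gA_star_not _ h]
    simp
  | more n ih _ =>
    have hrep : List.replicate (n + 2) '*' = '*' :: '*' :: List.replicate n '*' := by
      simp [List.replicate_succ]
    rw [hrep, List.cons_append, List.cons_append, gA_star_star, ih, out_star_toList,
      out_star_toList]
    have hdiv : (n + 2) / 2 = n / 2 + 1 := by omega
    have hmod : (n + 2) % 2 = n % 2 := by omega
    rw [hdiv, hmod, List.replicate_succ, List.flatten_cons]
    simp [List.append_assoc]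

theorem gA_char_run (c : Char) (hc : c ≠ '*') (k : Nat) (rest : List Char) :
    gA (List.replicate k c ++ rest) = (pvGroupOut (c, k)).toList ++ gA rest := by
  induction k with
  | zero => simp [out_char_toList c hc]
  | succ k ih =>
    rw [List.replicate_succ, List.cons_append, gA_cons _ _ hc, ih, out_char_toList c hc,
      out_char_toList c hc, List.replicate_succ, List.flatten_cons]
    simp [List.append_assoc]

theorem rle_out (cs : List Char) :
    ∀ (c : Char) (k : Nat),
      joinL ((rleFrom c k cs).map pvGroupOut) = gA (List.replicate k c ++ cs) := by
  induction cs with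
  | nil =>
    intro c k
    rw [List.append_nil]
    by_cases hc : c = '*'
    · subst hc
      rw [show (List.replicate k '*' : List Char) = List.replicate k '*' ++ [] by simp,
        gA_star_run k [] (by simp), gA_nil, List.append_nil]
      simp [rleFrom, joinL]
    · rw [show (List.replicate k c : List Char) = List.replicate k c ++ [] by simp,
        gA_char_run c hc k [], gA_nil, List.append_nil]
      simp [rleFrom, joinL]
  | cons d t ih =>
    intro c k
    rw [rleFrom]
    by_cases hdc : d = c
    · rw [if_pos hdc, hdc, ih c (k + 1)]
      subst hdc
      rw [show List.replicate (k + 1) d ++ t = List.replicate k d ++ (d :: t) by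
        rw [List.replicate_succ']; simp]
    · rw [if_neg hdc]
      have ih1 := ih d 1
      rw [List.replicate_one, List.singleton_append] at ih1
      rw [List.map_cons, joinL_cons, ih1]
      by_cases hc : c = '*'
      · subst hc
        rw [gA_star_run k (d :: t) (by simp [hdc])]
      · rw [gA_char_run c hc k (d :: t)]

-- ===== VERDICT (by name: the statement is the Claim_ definition above) =====
theorem fnmatch_to_regex_spec : Claim_equal_fnmatch_to_regex := by
  intro pat _
  unfold Spec_fnmatch_to_regex
  apply String.toList_inj.mp
  rw [fnmatch_to_regex, fnmatch_to_regex_alt]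
  simp only [String.toList_append, joinEmpty_toList]
  rw [loopA_eq]
  simp only [List.drop_zero, joinL, List.map_nil, List.flatten_nil, List.nil_append]
  cases hpt : pat.toList with
  | nil => simp [gA_nil]
  | cons c t =>
    rw [List.foldl_cons]
    have h0 : pvGroupStep [] c = [(c, 1)] := by simp [pvGroupStep]
    rw [h0, show [(c, 1)] = ([] : List (Char × Nat)) ++ [(c, 1)] from rfl,
      foldl_step_eq t [] c 1, List.nil_append]
    have := rle_out t c 1
    rw [List.replicate_one, List.singleton_append] at this
    rw [joinL] at this
    rw [this]
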